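-- pv_equiv track=rewrite | github.com/rishabh-ghosh24/logan-mcp-server | src/oci_logan_mcp/dashboard_service.py | _compute_tile_positions
-- ===== SOURCE A (Python) =====
-- from typing import Any, Dict, List, Optional
--
-- def _compute_tile_positions(tiles: List[Dict[str, Any]]) -> List[Dict[str, int]]:
--     """Compute grid positions for tiles in a 12-column layout.
--
--     Arranges tiles left-to-right, top-to-bottom. When a tile doesn't
--     fit in the remaining columns of the current row, it moves to the
--     next row.
--     """
--     positions = []
--     current_row = 0
--     current_col = 0
--     row_height = 0
--     for tile in tiles:
--         w = tile.get("width", 12)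
--         h = tile.get("height", 4)
--         # If tile doesn't fit in remaining space, move to next row
--         if current_col + w > 12:
--             current_row += row_height
--             current_col = 0
--             row_height = 0
--         positions.append({"row": current_row, "column": current_col, "height": h, "width": w})
--         current_col += w
--         row_height = max(row_height, h)
--     return positions
-- ===== SOURCE B (Python) =====
-- from typing import Any, Dict, List
--
-- def _compute_tile_positions(tiles: List[Dict[str, Any]]) -> List[Dict[str, int]]:
--     """Two-pass variant: first group tiles into rows, then emit positions
--     from cumulative offsets."""
--     # Pass 1: split tiles into rows of (w, h), starting a new row when the
--     # running column width plus the tile's width would exceed 12.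
--     rows = []
--     cur = []
--     col = 0
--     for tile in tiles:
--         w = tile.get("width", 12)
--         h = tile.get("height", 4)
--         if col + w > 12:
--             rows.append(cur)
--             cur = []
--             col = 0
--         cur.append((w, h))
--         col += w
--     rows.append(cur)
--     # Pass 2: top offset of each row = cumulative sum of previous rows'
--     # max heights (never negative); columns = cumulative sum of widths.
--     positions = []
--     top = 0
--     for row in rows:
--         c = 0
--         for w, h in row:
--             positions.append({"row": top, "column": c, "height": h, "width": w})
--             c += w
--         top += max([0] + [h for _, h in row])
--     return positions
-- ===== Notes on version B (the rewrite author's own statement) =====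
-- stated objective: alternative
-- what changed: Replaces A's single loop with mutable row/col/row-height state by a two-pass decomposition: first group tiles into rows, then emit positions from cumulative sums of row max-heights and widths.
import Mathlib
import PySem

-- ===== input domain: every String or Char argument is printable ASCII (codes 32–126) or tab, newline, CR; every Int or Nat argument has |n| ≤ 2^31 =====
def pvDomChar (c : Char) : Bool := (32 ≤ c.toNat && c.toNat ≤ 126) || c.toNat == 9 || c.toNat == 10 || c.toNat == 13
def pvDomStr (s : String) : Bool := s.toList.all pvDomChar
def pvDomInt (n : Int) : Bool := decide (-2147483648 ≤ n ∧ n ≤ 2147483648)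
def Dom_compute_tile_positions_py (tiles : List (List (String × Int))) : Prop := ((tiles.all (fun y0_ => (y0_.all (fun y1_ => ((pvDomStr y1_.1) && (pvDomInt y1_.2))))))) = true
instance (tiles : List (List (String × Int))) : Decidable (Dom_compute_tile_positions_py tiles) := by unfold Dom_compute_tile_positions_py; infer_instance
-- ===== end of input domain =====

-- B replaces A's single loop with mutable row/col/row-height state by a two-pass
-- decomposition (group tiles into rows, then emit positions from cumulative sums);
-- same O(n) cost, objective: alternative decomposition.

-- ===== PORT A =====
-- tile.get(k, d): first-match lookup in the association list (Python dict semantics)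
def pvDget (t : List (String × Int)) (k : String) (d : Int) : Int :=
  match t.find? (fun p => p.1 == k) with
  | some p => p.2
  | none => d

-- loop body of A: state = (positions, current_row, current_col, row_height)
def pvAStep (st : List (List (String × Int)) × Int × Int × Int) (t : List (String × Int)) :
    List (List (String × Int)) × Int × Int × Int :=
  let w := pvDget t "width" 12
  let h := pvDget t "height" 4
  let st2 := if st.2.2.1 + w > 12 then (st.1, st.2.1 + st.2.2.2, (0 : Int), (0 : Int)) else st
  (st2.1 ++ [[("row", st2.2.1), ("column", st2.2.2.1), ("height", h), ("width", w)]],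
   st2.2.1, st2.2.2.1 + w, max st2.2.2.2 h)

def compute_tile_positions_py (tiles : List (List (String × Int))) : List (List (String × Int)) :=
  (tiles.foldl pvAStep ([], 0, 0, 0)).1

-- ===== PORT B =====
-- pass-1 loop body: state = (rows, cur, col)
def pvP1Step (st : List (List (Int × Int)) × List (Int × Int) × Int) (t : List (String × Int)) :
    List (List (Int × Int)) × List (Int × Int) × Int :=
  let w := pvDget t "width" 12
  let h := pvDget t "height" 4
  let st2 := if st.2.2 + w > 12 then (st.1 ++ [st.2.1], ([] : List (Int × Int)), (0 : Int)) else st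
  (st2.1, st2.2.1 ++ [(w, h)], st2.2.2 + w)

-- inner loop of pass 2 (one row, top = current row offset): state = (positions, c)
def pvInnerStep (top : Int) (q : List (List (String × Int)) × Int) (wh : Int × Int) :
    List (List (String × Int)) × Int :=
  (q.1 ++ [[("row", top), ("column", q.2), ("height", wh.2), ("width", wh.1)]], q.2 + wh.1)

-- pass-2 loop body: state = (positions, top); Python's max([0]+hs) on this
-- nonempty list is exactly the running max (PySem.List.max?_id_cons)
def pvP2Step (st : List (List (String × Int)) × Int) (row : List (Int × Int)) :
    List (List (String × Int)) × Int :=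
  ((row.foldl (pvInnerStep st.2) (st.1, 0)).1,
   st.2 + (row.map (fun p => p.2)).foldl max 0)

def compute_tile_positions_py_alt (tiles : List (List (String × Int))) : List (List (String × Int)) :=
  let p := tiles.foldl pvP1Step ([], [], 0)
  let rows := p.1 ++ [p.2.1]
  (rows.foldl pvP2Step ([], 0)).1

-- ===== PRECONDITION & SPEC =====
def Spec_compute_tile_positions_py (tiles : List (List (String × Int))) (out : List (List (String × Int))) : Prop := out = compute_tile_positions_py_alt tiles
instance (tiles : List (List (String × Int))) (out : List (List (String × Int))) : Decidable (Spec_compute_tile_positions_py tiles out) := by unfold Spec_compute_tile_positions_py; infer_instance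

-- ===== CLAIM (what is proved, stated in full; the proofs are below) =====
def Claim_equal_compute_tile_positions_py : Prop := ∀ (tiles : List (List (String × Int))), Dom_compute_tile_positions_py tiles → Spec_compute_tile_positions_py tiles (compute_tile_positions_py tiles)

-- ===== LEMMAS AND PROOFS =====

-- the emitted dict for one tile
def pvDictOf (r c h w : Int) : List (String × Int) :=
  [("row", r), ("column", c), ("height", h), ("width", w)]

-- positions A emits for the remaining tiles from a given state
def pvRestA : List (List (String × Int)) → Int → Int → Int → List (List (String × Int))
  | [], _, _, _ => []
  | t :: ts, top, col, rh =>
    let w := pvDget t "width" 12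
    let h := pvDget t "height" 4
    if col + w > 12 then pvDictOf (top + rh) 0 h w :: pvRestA ts (top + rh) w (max 0 h)
    else pvDictOf top col h w :: pvRestA ts top (col + w) (max rh h)

-- the rows pass 1 still produces (including the final partial row)
def pvRowsOf : List (List (String × Int)) → List (Int × Int) → Int → List (List (Int × Int))
  | [], cur, _ => [cur]
  | t :: ts, cur, col =>
    let w := pvDget t "width" 12
    let h := pvDget t "height" 4
    if col + w > 12 then cur :: pvRowsOf ts [(w, h)] w
    else pvRowsOf ts (cur ++ [(w, h)]) (col + w)

def pvEmitRow (top c : Int) : List (Int × Int) → List (List (String × Int))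
  | [] => []
  | (w, h) :: r => pvDictOf top c h w :: pvEmitRow top (c + w) r

def pvRowMax (r : List (Int × Int)) : Int := r.foldl (fun m p => max m p.2) 0

def pvSumW : List (Int × Int) → Int
  | [] => 0
  | p :: r => p.1 + pvSumW r

def pvEmitRows (top : Int) : List (List (Int × Int)) → List (List (String × Int))
  | [] => []
  | r :: rs => pvEmitRow top 0 r ++ pvEmitRows (top + pvRowMax r) rs

theorem pvFoldA_char (ts : List (List (String × Int))) :
    ∀ (pos : List (List (String × Int))) (top col rh : Int),
      (ts.foldl pvAStep (pos, top, col, rh)).1 = pos ++ pvRestA ts top col rh := by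
  induction ts with
  | nil => intro pos top col rh; simp [pvRestA]
  | cons t ts ih =>
    intro pos top col rh
    simp only [List.foldl_cons, pvAStep, pvRestA]
    by_cases h : col + pvDget t "width" 12 > 12 <;> simp [h, ih, pvDictOf]

theorem pvFoldP1_char (ts : List (List (String × Int))) :
    ∀ (rows : List (List (Int × Int))) (cur : List (Int × Int)) (col : Int),
      (ts.foldl pvP1Step (rows, cur, col)).1 ++ [(ts.foldl pvP1Step (rows, cur, col)).2.1]
        = rows ++ pvRowsOf ts cur col := by
  induction ts with
  | nil => intro rows cur col; simp [pvRowsOf]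
  | cons t ts ih =>
    intro rows cur col
    simp only [List.foldl_cons, pvP1Step, pvRowsOf]
    by_cases h : col + pvDget t "width" 12 > 12 <;> simp [h, ih]

theorem pvFoldInner_char (top : Int) (r : List (Int × Int)) :
    ∀ (pos : List (List (String × Int))) (c : Int),
      (r.foldl (pvInnerStep top) (pos, c)).1 = pos ++ pvEmitRow top c r := by
  induction r with
  | nil => intro pos c; simp [pvEmitRow]
  | cons p r ih =>
    intro pos c
    obtain ⟨w, h⟩ := p
    simp only [List.foldl_cons, pvInnerStep, pvEmitRow]
    simp [ih, pvDictOf]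

theorem pvRowMax_map (r : List (Int × Int)) :
    (r.map (fun p => p.2)).foldl max 0 = pvRowMax r := by
  simp [pvRowMax, List.foldl_map]

theorem pvFoldP2_char (rows : List (List (Int × Int))) :
    ∀ (pos : List (List (String × Int))) (top : Int),
      (rows.foldl pvP2Step (pos, top)).1 = pos ++ pvEmitRows top rows := by
  induction rows with
  | nil => intro pos top; simp [pvEmitRows]
  | cons r rs ih =>
    intro pos top
    simp only [List.foldl_cons, pvP2Step, pvEmitRows]
    rw [pvFoldInner_char, pvRowMax_map, ih]
    simp

theorem pvSumW_append (xs : List (Int × Int)) (p : Int × Int) :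
    pvSumW (xs ++ [p]) = pvSumW xs + p.1 := by
  induction xs with
  | nil => simp [pvSumW]
  | cons q xs ih => simp [pvSumW, ih]; ring

theorem pvRowMax_append (xs : List (Int × Int)) (w h : Int) :
    pvRowMax (xs ++ [(w, h)]) = max (pvRowMax xs) h := by
  simp [pvRowMax, List.foldl_append]

theorem pvEmitRow_append (top : Int) (xs : List (Int × Int)) (w h : Int) :
    ∀ c : Int, pvEmitRow top c (xs ++ [(w, h)])
      = pvEmitRow top c xs ++ [pvDictOf top (c + pvSumW xs) h w] := by
  induction xs with
  | nil => intro c; simp [pvEmitRow, pvSumW]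
  | cons p xs ih =>
    intro c
    obtain ⟨w', h'⟩ := p
    simp only [List.cons_append, pvEmitRow, ih, pvSumW]
    ring_nf

theorem pvMain (ts : List (List (String × Int))) :
    ∀ (cur : List (Int × Int)) (col top : Int), col = pvSumW cur →
      pvEmitRows top (pvRowsOf ts cur col)
        = pvEmitRow top 0 cur ++ pvRestA ts top col (pvRowMax cur) := by
  induction ts with
  | nil => intro cur col top _; simp [pvRowsOf, pvEmitRows, pvRestA]
  | cons t ts ih =>
    intro cur col top hcol
    simp only [pvRowsOf, pvRestA]
    by_cases h : col + pvDget t "width" 12 > 12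
    · simp only [h, if_pos]
      rw [pvEmitRows, ih [(pvDget t "width" 12, pvDget t "height" 4)]
        (pvDget t "width" 12) (top + pvRowMax cur) (by simp [pvSumW])]
      simp [pvEmitRow, pvRowMax, pvDictOf]
    · simp only [h, if_false]
      rw [ih (cur ++ [(pvDget t "width" 12, pvDget t "height" 4)])
        (col + pvDget t "width" 12) top (by rw [pvSumW_append, hcol]),
        pvEmitRow_append, pvRowMax_append]
      simp [hcol]

-- ===== VERDICT (by name: the statement is the Claim_ definition above) =====
theorem compute_tile_positions_py_spec : Claim_equal_compute_tile_positions_py := by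
  intro tiles _
  unfold Spec_compute_tile_positions_py compute_tile_positions_py compute_tile_positions_py_alt
  rw [pvFoldA_char]
  have hrows :
      (tiles.foldl pvP1Step ([], [], 0)).1 ++ [(tiles.foldl pvP1Step ([], [], 0)).2.1]
        = pvRowsOf tiles [] 0 := by
    simpa using pvFoldP1_char tiles [] [] 0
  simp only [hrows, pvFoldP2_char]
  rw [pvMain tiles [] 0 0 (by simp [pvSumW])]
  simp [pvEmitRow, pvRowMax]
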